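-- pv_equiv track=rewrite | github.com/emerzon/mt-data-mcp | src/mtdata/core/causal.py | _pair_overlap_symbols
-- ===== SOURCE A (Python) =====
-- from typing import Any, Dict, List, Optional, Tuple
--
-- def _pair_overlap_symbols(
--     pair_key: str, symbols: List[str] | None = None
-- ) -> tuple[str, str]:
--     text = str(pair_key)
--     if symbols:
--         ordered = sorted(
--             {str(symbol) for symbol in symbols if symbol}, key=len, reverse=True
--         )
--         for left in ordered:
--             prefix = f"{left}-"
--             if not text.startswith(prefix):
--                 continue
--             right = text[len(prefix) :]
--             if right in ordered:
--                 return left, right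
--     left, _, right = text.partition("-")
--     return left, right
-- ===== SOURCE B (Python) =====
-- def _pair_overlap_symbols(pair_key, symbols=None):
--     text = str(pair_key)
--     if symbols:
--         syms = {str(symbol) for symbol in symbols if symbol}
--         best = max((i for i, ch in enumerate(text)
--                     if ch == "-" and text[:i] in syms and text[i + 1:] in syms),
--                    default=None)
--         if best is not None:
--             return text[:best], text[best + 1:]
--     left, _, right = text.partition("-")
--     return left, right
-- ===== Notes on version B (the rewrite author's own statement) =====
-- stated objective: alternative
-- what changed: Instead of sorting the symbol set longest-first and scanning symbols with startswith, B takes max() over the enumerated dash positions of the key whose two sides are both in the (unsorted) symbol set, eliminating the sort; the no-match fallback stays text.partition('-').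
import Mathlib
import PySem

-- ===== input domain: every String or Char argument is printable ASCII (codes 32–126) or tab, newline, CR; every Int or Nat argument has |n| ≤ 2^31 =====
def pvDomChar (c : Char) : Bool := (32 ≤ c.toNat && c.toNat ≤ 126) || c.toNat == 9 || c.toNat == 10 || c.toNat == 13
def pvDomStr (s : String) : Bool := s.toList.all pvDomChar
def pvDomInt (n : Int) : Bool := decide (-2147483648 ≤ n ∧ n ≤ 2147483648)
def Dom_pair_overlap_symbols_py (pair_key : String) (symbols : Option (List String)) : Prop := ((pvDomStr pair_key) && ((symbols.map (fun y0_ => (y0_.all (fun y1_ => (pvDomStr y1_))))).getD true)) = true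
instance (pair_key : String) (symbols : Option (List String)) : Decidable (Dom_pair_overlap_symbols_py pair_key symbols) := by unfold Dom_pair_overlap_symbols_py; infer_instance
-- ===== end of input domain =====

-- B replaces A's sort-symbols-longest-first scan by max() over the dash positions of the key
-- whose two sides are both in the (unsorted) symbol set (objective: alternative, no sort).

-- ===== PORT A =====
-- text.partition("-") for the literal one-char separator: scan to the first '-' (exact there).
def pvPartDash : List Char → List Char × List Char
  | [] => ([], [])
  | c :: cs =>
      if c = '-' then ([], cs)
      else
        let p := pvPartDash cs
        (c :: p.1, p.2)

-- A's `for left in ordered: …` loop; `all` is the full `ordered` list that `right in ordered` reads.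
def pvLoopA (text : List Char) (all : List (List Char)) : List (List Char) → Option (List Char × List Char)
  | [] => none
  | left :: rest =>
      let pfx := left ++ ['-']
      if PySem.Chars.startswith text pfx then
        -- right = text[len(prefix):] — nonnegative slice = drop
        let right := text.drop pfx.length
        if all.contains right then some (left, right) else pvLoopA text all rest
      else pvLoopA text all rest

-- NOTE: Python sorts the SET {str(s) for s in symbols if s} with key=len, so the relative order of
-- equal-length symbols follows CPython's hash order, which is not modelled; the port sorts the
-- insertion-ordered PySem.Set instead. A's RETURN VALUE does not depend on that tie order (at most
-- one symbol of each length can be the prefix of text, and the final membership test is order-free),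
-- so the port is exact on the result.
def pair_overlap_symbols_py (pair_key : String) (symbols : Option (List String)) : String × String :=
  let text := pair_key.toList
  match symbols with
  | some syms =>
      if syms.isEmpty then (String.ofList (pvPartDash text).1, String.ofList (pvPartDash text).2)
      else
        let ordered := PySem.List.sorted
          (PySem.Set.ofList ((syms.map String.toList).filter (fun t => !t.isEmpty)))
          (fun t => t.length) true
        match pvLoopA text ordered ordered with
        | some (l, r) => (String.ofList l, String.ofList r)
        | none => (String.ofList (pvPartDash text).1, String.ofList (pvPartDash text).2)
  | none => (String.ofList (pvPartDash text).1, String.ofList (pvPartDash text).2)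

-- ===== PORT B =====
-- B's `max((i for i, ch in enumerate(text) if …), default=None)`: the filtered index list and
-- PySem.List.max?. B's fallback is text.partition('-') hand-ported via the first dash index:
-- List.idxOf '-' is text.length when no dash occurs, so take/drop give (text, []) there — exact.
def pair_overlap_symbols_py_alt (pair_key : String) (symbols : Option (List String)) : String × String :=
  let text := pair_key.toList
  match symbols with
  | some (s0 :: rest) =>
      let syms : PySem.Set (List Char) :=
        PySem.Set.ofList (((s0 :: rest).map String.toList).filter (fun t => !t.isEmpty))
      let cands := (List.range text.length).filter (fun i =>
          text[i]? == some '-' && PySem.Set.contains syms (text.take i)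
            && PySem.Set.contains syms (text.drop (i + 1)))
      match PySem.List.max? cands (fun i => i) with
      | some best => (String.ofList (text.take best), String.ofList (text.drop (best + 1)))
      | none =>
          (String.ofList (text.take (text.idxOf '-')), String.ofList (text.drop (text.idxOf '-' + 1)))
  | _ => (String.ofList (text.take (text.idxOf '-')), String.ofList (text.drop (text.idxOf '-' + 1)))

-- ===== PRECONDITION & SPEC =====
def Spec_pair_overlap_symbols_py (pair_key : String) (symbols : Option (List String)) (out : String × String) : Prop := out = pair_overlap_symbols_py_alt pair_key symbols
instance (pair_key : String) (symbols : Option (List String)) (out : String × String) : Decidable (Spec_pair_overlap_symbols_py pair_key symbols out) := by unfold Spec_pair_overlap_symbols_py; infer_instance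

-- ===== CLAIM (what is proved, stated in full; the proofs are below) =====
def Claim_equal_pair_overlap_symbols_py : Prop := ∀ (pair_key : String) (symbols : Option (List String)), Dom_pair_overlap_symbols_py pair_key symbols → Spec_pair_overlap_symbols_py pair_key symbols (pair_overlap_symbols_py pair_key symbols)

-- ===== LEMMAS AND PROOFS =====

-- "position i of text is a valid split against the symbol pool S"
def pvCand (text : List Char) (S : List (List Char)) (i : Nat) : Prop :=
  text[i]? = some '-' ∧ text.take i ∈ S ∧ text.drop (i + 1) ∈ S

lemma pvCand_lt {text : List Char} {S : List (List Char)} {i : Nat}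
    (h : pvCand text S i) : i < text.length := by
  have := h.1
  rw [List.getElem?_eq_some_iff] at this
  exact this.1

-- A's fallback and B's fallback compute the same partition.
lemma pvPartDash_eq (text : List Char) :
    pvPartDash text = (text.take (text.idxOf '-'), text.drop (text.idxOf '-' + 1)) := by
  induction text with
  | nil => rfl
  | cons c cs ih =>
      by_cases h : c = '-'
      · subst h; simp [pvPartDash]
      · simp [pvPartDash, h, ih]

lemma pvStartswith_dash_iff (text left : List Char) :
    PySem.Chars.startswith text (left ++ ['-']) = true ↔
      text.take left.length = left ∧ text[left.length]? = some '-' := by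
  rw [PySem.Chars.startswith_iff]
  constructor
  · rintro ⟨t, ht⟩
    have htext : text = left ++ '-' :: t := by
      rw [← ht]; simp
    subst htext
    constructor
    · simp
    · rw [List.getElem?_append_right (Nat.le_refl _)]
      simp
  · rintro ⟨h1, h2⟩
    have : left ++ ['-'] = text.take (left.length + 1) := by
      rw [List.take_add_one, h1, h2]
      rfl
    rw [this]
    exact List.take_prefix _ _

lemma pvLoopA_spec (text : List Char) (all : List (List Char)) :
    ∀ ordered : List (List Char),
    ordered.Pairwise (fun a b => b.length ≤ a.length) →
    (∀ x, x ∈ ordered → x ∈ all) →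
    (∀ i, pvCand text all i → text.take i ∈ ordered) →
    (pvLoopA text all ordered = none ∧ ∀ i, ¬ pvCand text all i) ∨
    (∃ i, pvCand text all i ∧ (∀ j, pvCand text all j → j ≤ i) ∧
      pvLoopA text all ordered = some (text.take i, text.drop (i + 1))) := by
  intro ordered
  induction ordered with
  | nil =>
      intro _ _ hcomp
      exact Or.inl ⟨rfl, fun i hi => by simpa using hcomp i hi⟩
  | cons left rest ih =>
      intro hpw hsub hcomp
      by_cases hsw : PySem.Chars.startswith text (left ++ ['-']) = true
      · obtain ⟨htake, hget⟩ := (pvStartswith_dash_iff text left).mp hsw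
        by_cases hmem : text.drop (left.length + 1) ∈ all
        · -- head hits: the split position is i₀ = left.length
          refine Or.inr ⟨left.length, ⟨hget, ?_, hmem⟩, ?_, ?_⟩
          · rw [htake]; exact hsub left List.mem_cons_self
          · intro j hj
            have hjlt : j < text.length := pvCand_lt hj
            have hjlen : (text.take j).length = j := by
              simp [List.length_take]; omega
            rcases List.mem_cons.mp (hcomp j hj) with h | h
            · have : (text.take j).length = left.length := by rw [h]
              omega
            · have := (List.pairwise_cons.mp hpw).1 _ h
              omega
          · simp only [pvLoopA, hsw, if_true]
            rw [show (left ++ ['-']).length = left.length + 1 by simp]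
            rw [(by simpa using hmem : all.contains (text.drop (left.length + 1)) = true)]
            simp [htake]
        · -- head's membership test fails: recurse
          have hcomp' : ∀ i, pvCand text all i → text.take i ∈ rest := by
            intro i hi
            rcases List.mem_cons.mp (hcomp i hi) with h | h
            · exfalso
              have hilt : i < text.length := pvCand_lt hi
              have hilen : (text.take i).length = i := by
                simp [List.length_take]; omega
              have hlen : left.length = i := by rw [← h]; exact hilen
              exact hmem (hlen ▸ hi.2.2)
            · exact h
          have hrec := ih (List.pairwise_cons.mp hpw).2
            (fun x hx => hsub x (List.mem_cons_of_mem _ hx)) hcomp'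
          have hstep : pvLoopA text all (left :: rest) = pvLoopA text all rest := by
            simp only [pvLoopA, hsw, if_true]
            rw [show (left ++ ['-']).length = left.length + 1 by simp]
            rw [(by simpa using hmem : all.contains (text.drop (left.length + 1)) = false)]
            simp
          rw [hstep]
          exact hrec
      · -- startswith fails: recurse
        have hcomp' : ∀ i, pvCand text all i → text.take i ∈ rest := by
          intro i hi
          rcases List.mem_cons.mp (hcomp i hi) with h | h
          · exfalso
            have hilt : i < text.length := pvCand_lt hi
            have hilen : (text.take i).length = i := by
              simp [List.length_take]; omega
            have hlen : left.length = i := by rw [← h]; exact hilen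
            apply hsw
            rw [pvStartswith_dash_iff, hlen]
            exact ⟨h, hi.1⟩
          · exact h
        have hrec := ih (List.pairwise_cons.mp hpw).2
          (fun x hx => hsub x (List.mem_cons_of_mem _ hx)) hcomp'
        have hstep : pvLoopA text all (left :: rest) = pvLoopA text all rest := by
          simp only [pvLoopA]
          rw [Bool.not_eq_true] at hsw
          rw [hsw]
          simp
        rw [hstep]
        exact hrec

-- membership in B's candidate list = pvCand
lemma pvMem_cands (text : List Char) (S : PySem.Set (List Char)) (i : Nat) :
    i ∈ (List.range text.length).filter (fun i =>
        text[i]? == some '-' && PySem.Set.contains S (text.take i)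
          && PySem.Set.contains S (text.drop (i + 1))) ↔ pvCand text S i := by
  rw [List.mem_filter, List.mem_range]
  constructor
  · rintro ⟨_, h⟩
    simp only [Bool.and_eq_true, beq_iff_eq] at h
    exact ⟨h.1.1, by simpa using h.1.2, by simpa using h.2⟩
  · intro h
    refine ⟨pvCand_lt h, ?_⟩
    simp only [Bool.and_eq_true, beq_iff_eq]
    exact ⟨⟨h.1, by simpa using h.2.1⟩, by simpa using h.2.2⟩

-- ===== VERDICT (by name: the statement is the Claim_ definition above) =====
theorem pair_overlap_symbols_py_spec : Claim_equal_pair_overlap_symbols_py := by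
  intro pair_key symbols _
  show pair_overlap_symbols_py pair_key symbols = pair_overlap_symbols_py_alt pair_key symbols
  rcases symbols with _ | (_ | ⟨s0, rest⟩)
  · simp [pair_overlap_symbols_py, pair_overlap_symbols_py_alt, pvPartDash_eq]
  · simp [pair_overlap_symbols_py, pair_overlap_symbols_py_alt, pvPartDash_eq]
  · simp only [pair_overlap_symbols_py, pair_overlap_symbols_py_alt, List.isEmpty_cons,
      Bool.false_eq_true, if_false]
    set text := pair_key.toList with htext
    set S : PySem.Set (List Char) :=
      PySem.Set.ofList ((((s0 :: rest)).map String.toList).filter (fun t => !t.isEmpty)) with hS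
    set cands := (List.range text.length).filter (fun i =>
        text[i]? == some '-' && PySem.Set.contains S (text.take i)
          && PySem.Set.contains S (text.drop (i + 1))) with hcands
    have hCandiff : ∀ i,
        pvCand text (PySem.List.sorted S (fun t => t.length) true) i ↔ pvCand text S i := by
      intro i
      unfold pvCand
      rw [PySem.List.mem_sorted, PySem.List.mem_sorted]
    have hA := pvLoopA_spec text
      (PySem.List.sorted S (fun t => t.length) true)
      (PySem.List.sorted S (fun t => t.length) true)
      (PySem.List.sorted_pairwise_rev _ _) (fun x hx => hx) (fun i hi => hi.2.1)
    rcases hA with ⟨eA, hnoA⟩ | ⟨i, hci, hmax, eA⟩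
    · rw [eA]
      have hnone : PySem.List.max? cands (fun i => i) = none := by
        rw [PySem.List.max?_eq_none_iff]
        rcases h : cands with _ | ⟨j, _⟩
        · rfl
        · exfalso
          have : j ∈ cands := h ▸ List.mem_cons_self
          exact hnoA j ((hCandiff j).mpr ((pvMem_cands text S j).mp this))
      rw [hnone]
      simp [pvPartDash_eq]
    · rw [eA]
      rcases hmx : PySem.List.max? cands (fun i => i) with _ | best
      · exfalso
        rw [PySem.List.max?_eq_none_iff] at hmx
        have : i ∈ cands := (pvMem_cands text S i).mpr ((hCandiff i).mp hci)
        rw [hmx] at this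
        simp at this
      · have hbmem : best ∈ cands := PySem.List.max?_mem hmx
        have hbcand : pvCand text S best := (pvMem_cands text S best).mp hbmem
        have h1 : best ≤ i := hmax best ((hCandiff best).mpr hbcand)
        have h2 : i ≤ best := PySem.List.max?_isMax hmx i
          ((pvMem_cands text S i).mpr ((hCandiff i).mp hci))
        have : i = best := le_antisymm h2 h1
        rw [this]
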